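-- pv_equiv track=rewrite | github.com/pypi-data/pypi-mirror-297 | packages/torchcell/torchcell-0.2.8.tar.gz/torchcell-0.2.8/torchcell/sequence/data.py | get_chr_from_description
-- ===== SOURCE A (Python) =====
-- def get_chr_from_description(description: str) -> int:
--     """
--     Extracts the chromosome number from a given description string.
--
--     Processes a description string containing either a chromosome
--     in Roman numeral (e.g., "[chromosome=IX]").
--     Or a location (e.g., "[location=mitochondrion]").
--     If a chromosome is found, it converts the Roman numeral to an integer.
--     If the location is a mitochondrion, it returns 0.
--     Handles descriptions containing chromosome information in a predefined format.
--
--     Args: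
--         description (str): Description string containing chromosome number
--
--     Returns:
--         int: Chromosome number.  Returns 0 if the location is mitochondrion.
--
--     Raises:
--         ValueError: If the Roman numeral conversion fails due to invalid format.
--
--     Example:
--         >>> get_chr_from_description("[chromosome=IX] some other info")
--         9
--         >>> get_chr_from_description("[location=mitochondrion] some other info")
--         0
--     """
--     # CHECK - format might be specific yeast S288C genome
--     desc_split = description.split()
--     for part in desc_split:
--         if part.startswith("[chromosome="):
--             roman_num = part[
--                 len("[chromosome=") : -1
--             ]  # Exclude the last char, which is "]"
--             return roman_to_int(roman_num)
--         elif part.startswith("[location="):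
--             # we assign mitochondiral DNA to chromosome 0 as convenience
--             if part[len("[location=") : -1] == "mitochondrion":
--                 return 0
--
-- def roman_to_int(s: str) -> int:
--     """
--     Converts a Roman numeral string to an integer.
--
--     This function interprets the given string `s` as a Roman numeral and
--     returns its value as an integer. It handles the standard Roman numeral
--     symbols (I, V, X, L, C, D, M) and uses the subtractive notation rule,
--     where placing a smaller numeral to the left of a larger numeral
--     represents subtraction (e.g., IV for 4).
--
--     Args:
--         s (str): The Roman numeral string to convert, consisting of the characters
--                  I, V, X, L, C, D, M. It is assumed to be a valid Roman numeral.
--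
--     Returns:
--         int: The integer value of the Roman numeral.
--
--     Raises:
--         KeyError: If input string contains characters without valid Roman numeral.
--
--     Example:
--         >>> roman_to_int("IV")
--         4
--         >>> roman_to_int("IX")
--         9
--         >>> roman_to_int("XIII")
--         13
--
--     """
--     roman_to_int_mapping = {
--         "I": 1,
--         "V": 5,
--         "X": 10,
--         "L": 50,
--         "C": 100,
--         "D": 500,
--         "M": 1000,
--     }
--     result = 0
--     for i in range(len(s)):
--         if i > 0 and roman_to_int_mapping[s[i]] > roman_to_int_mapping[s[i - 1]]:
--             result += roman_to_int_mapping[s[i]] - 2 * roman_to_int_mapping[s[i - 1]]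
--         else:
--             result += roman_to_int_mapping[s[i]]
--     return result
-- ===== SOURCE B (Python) =====
-- def get_chr_from_description(description: str) -> int:
--     roman = {"I": 1, "V": 5, "X": 10, "L": 50, "C": 100, "D": 500, "M": 1000}
--
--     def stops(part):
--         return part.startswith("[chromosome=") or (
--             part.startswith("[location=") and part[len("[location="):-1] == "mitochondrion"
--         )
--
--     part = next((p for p in description.split() if stops(p)), None)
--     if part is None:
--         return None
--     if not part.startswith("[chromosome="):
--         return 0
--     # staged conversion: stage 1 maps symbols to values, stage 2 totals them,
--     # stage 3 subtracts twice every value standing immediately left of a larger one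
--     vals = [roman[c] for c in part[len("[chromosome="):-1]]
--     total = sum(vals)
--     penalty = sum(a for a, b in zip(vals, vals[1:]) if a < b)
--     return total - 2 * penalty
-- ===== Notes on version B (the rewrite author's own statement) =====
-- stated objective: alternative
-- what changed: roman_to_int's single indexed loop with an in-place 2*prev subtractive correction is replaced by staged passes (map symbols to a value list, total it, then subtract twice the sum of values standing immediately left of a larger one), and the outer if/elif scan loop is replaced by a next()-pick of the first stopping token followed by straight-line classification.
import Mathlib
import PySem

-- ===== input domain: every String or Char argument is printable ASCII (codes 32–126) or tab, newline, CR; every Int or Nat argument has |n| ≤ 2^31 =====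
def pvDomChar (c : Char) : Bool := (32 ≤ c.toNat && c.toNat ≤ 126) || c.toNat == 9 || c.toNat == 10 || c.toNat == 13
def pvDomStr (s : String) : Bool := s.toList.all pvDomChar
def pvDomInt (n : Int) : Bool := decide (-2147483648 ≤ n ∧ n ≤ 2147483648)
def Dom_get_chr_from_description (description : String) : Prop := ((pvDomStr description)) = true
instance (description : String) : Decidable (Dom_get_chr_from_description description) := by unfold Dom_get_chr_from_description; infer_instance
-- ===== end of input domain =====

-- B replaces A's single indexed roman loop (with in-place 2*prev correction) by staged passes
-- (value list -> total -> penalty of values left of a larger one) and picks the first stopping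
-- token with next() instead of A's if/elif loop; objective: alternative decomposition, same cost.


-- ===== PORT A =====
-- the dict 'roman_to_int_mapping' / 'roman'; lookup of a char absent from it is a KeyError in
-- Python (excluded by Pre_), here it yields 0
def pvRomanVal (c : Char) : Int :=
  if c = 'I' then 1 else if c = 'V' then 5 else if c = 'X' then 10
  else if c = 'L' then 50 else if c = 'C' then 100 else if c = 'D' then 500
  else if c = 'M' then 1000 else 0

-- A's loop 'for i in range(len(s))': state = result, carrying s[i-1]'s value (0 stands for i = 0,
-- where the 'i > 0 and …' guard is false; with prev = 0 both branches add v, so this is exact)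
def roman_to_int_go (prev result : Int) : List Char → Int
  | [] => result
  | c :: rest =>
    let v := pvRomanVal c
    if v > prev then roman_to_int_go v (result + v - 2 * prev) rest
    else roman_to_int_go v (result + v) rest

def roman_to_int (s : List Char) : Int := roman_to_int_go 0 0 s

-- the 'for part in desc_split' loop of A
def get_chr_go : List String → Option Int
  | [] => none
  | part :: rest =>
    if PySem.Str.startswith part "[chromosome=" then
      some (roman_to_int (PySem.Str.slice part (some 12) (some (-1))).toList)
    else if PySem.Str.startswith part "[location=" &&
            (PySem.Str.slice part (some 10) (some (-1)) == "mitochondrion") then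
      some 0
    else get_chr_go rest

def get_chr_from_description (description : String) : Option Int :=
  get_chr_go (PySem.Str.split₀ description)

-- ===== PORT B =====
-- B's 'stops' predicate: does this token end the scan?
def pvStops (part : String) : Bool :=
  PySem.Str.startswith part "[chromosome=" ||
  (PySem.Str.startswith part "[location=" &&
   (PySem.Str.slice part (some 10) (some (-1)) == "mitochondrion"))

-- B's stage 3: 'sum(a for a, b in zip(vals, vals[1:]) if a < b)'
def pvPenalty (vals : List Int) : Int :=
  (((vals.zip vals.tail).filter (fun ab => ab.1 < ab.2)).map (fun ab => ab.1)).sum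

def get_chr_from_description_alt (description : String) : Option Int :=
  match (PySem.Str.split₀ description).find? pvStops with
  | none => none
  | some part =>
    if !(PySem.Str.startswith part "[chromosome=") then some 0
    else
      let vals := (PySem.Str.slice part (some 12) (some (-1))).toList.map pvRomanVal
      some (vals.sum - 2 * pvPenalty vals)

-- ===== PRECONDITION & SPEC =====
-- Pre_ excludes exactly the inputs where both Pythons raise KeyError: the first scan-stopping
-- token is a "[chromosome=…]" one whose numeral part contains a character outside IVXLCDM.
def Pre_get_chr_from_description (description : String) : Prop :=
  (((PySem.Str.split₀ description).dropWhile (fun p =>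
      !(PySem.Str.startswith p "[chromosome=" ||
        (PySem.Str.startswith p "[location=" &&
         (PySem.Str.slice p (some 10) (some (-1)) == "mitochondrion"))))).head?.all (fun part =>
    !(PySem.Str.startswith part "[chromosome=") ||
    (PySem.Str.slice part (some 12) (some (-1))).toList.all (fun c =>
      (['I','V','X','L','C','D','M'] : List Char).contains c))) = true
instance (description : String) : Decidable (Pre_get_chr_from_description description) := by
  unfold Pre_get_chr_from_description; infer_instance

def pvWitness_get_chr_from_description : String := "[chromosome=IX] some other info"

def Spec_get_chr_from_description (description : String) (out : Option Int) : Prop := out = get_chr_from_description_alt description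
instance (description : String) (out : Option Int) : Decidable (Spec_get_chr_from_description description out) := by unfold Spec_get_chr_from_description; infer_instance

-- ===== CLAIM (what is proved, stated in full; the proofs are below) =====
def Claim_equal_get_chr_from_description : Prop := ∀ (description : String), Dom_get_chr_from_description description → Pre_get_chr_from_description description → Spec_get_chr_from_description description (get_chr_from_description description)

-- ===== LEMMAS AND PROOFS =====

-- value of the first character, 0 for the empty list
def pvHeadVal : List Char → Int
  | [] => 0
  | c :: _ => pvRomanVal c

-- B's staged result on a value list
def pvBval (vals : List Int) : Int := vals.sum - 2 * pvPenalty vals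

lemma pvBval_cons (v : Int) (rest : List Int) (hv : 0 ≤ v) :
    pvBval (v :: rest) = v + pvBval rest - (if rest.headD 0 > v then 2 * v else 0) := by
  cases rest with
  | nil => simp [pvBval, pvPenalty]; omega
  | cons h t =>
    by_cases hv : v < h <;> simp [pvBval, pvPenalty, hv] <;> ring

lemma headD_map_pvRomanVal (cs : List Char) :
    (cs.map pvRomanVal).headD 0 = pvHeadVal cs := by
  cases cs <;> simp [pvHeadVal]

lemma roman_go_eq (cs : List Char) : ∀ prev result : Int, 0 ≤ prev →
    roman_to_int_go prev result cs =
      result + pvBval (cs.map pvRomanVal) -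
        (if pvHeadVal cs > prev then 2 * prev else 0) := by
  induction cs with
  | nil =>
    intro prev result hprev
    simp [roman_to_int_go, pvBval, pvPenalty, pvHeadVal]
    omega
  | cons c rest ih =>
    intro prev result hprev
    have hv : 0 ≤ pvRomanVal c := by unfold pvRomanVal; split_ifs <;> norm_num
    rw [show roman_to_int_go prev result (c :: rest) =
        (if pvRomanVal c > prev then
          roman_to_int_go (pvRomanVal c) (result + pvRomanVal c - 2 * prev) rest
        else roman_to_int_go (pvRomanVal c) (result + pvRomanVal c) rest) from rfl]
    rw [show (c :: rest).map pvRomanVal = pvRomanVal c :: rest.map pvRomanVal from by simp,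
        pvBval_cons _ _ hv, headD_map_pvRomanVal,
        show pvHeadVal (c :: rest) = pvRomanVal c from rfl,
        ih (pvRomanVal c) (result + pvRomanVal c - 2 * prev) hv,
        ih (pvRomanVal c) (result + pvRomanVal c) hv]
    split_ifs <;> omega

lemma roman_to_int_eq (cs : List Char) :
    roman_to_int cs = pvBval (cs.map pvRomanVal) := by
  unfold roman_to_int
  rw [roman_go_eq cs 0 0 le_rfl]
  split_ifs <;> omega

lemma get_chr_go_eq (parts : List String) :
    get_chr_go parts =
      (match parts.find? pvStops with
       | none => none
       | some part =>
         if !(PySem.Str.startswith part "[chromosome=") then some 0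
         else
           let vals := (PySem.Str.slice part (some 12) (some (-1))).toList.map pvRomanVal
           some (vals.sum - 2 * pvPenalty vals)) := by
  induction parts with
  | nil => simp [get_chr_go]
  | cons part rest ih =>
    by_cases hc : PySem.Str.startswith part "[chromosome=" = true
    · simp at hc
      simp [get_chr_go, List.find?, pvStops, roman_to_int_eq, pvBval, hc]
    · by_cases hl : (PySem.Str.startswith part "[location=" &&
          (PySem.Str.slice part (some 10) (some (-1)) == "mitochondrion")) = true
      · simp at hc hl
        simp [get_chr_go, List.find?, pvStops, hc, hl]
      · simp at hc hl
        by_cases hls : PySem.Chars.startswith part.toList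
            ['[','l','o','c','a','t','i','o','n','='] = true
        · have hne : (PySem.Str.slice part (some 10) (some (-1)) == "mitochondrion") = false :=
            beq_eq_false_iff_ne.mpr (hl hls)
          simp [get_chr_go, List.find?, pvStops, hc, hls, hne, ih]
        · simp [get_chr_go, List.find?, pvStops, hc, hls, ih]

-- ===== VERDICT (by name: the statement is the Claim_ definition above) =====
theorem get_chr_from_description_spec : Claim_equal_get_chr_from_description := by
  intro description _ _
  unfold Spec_get_chr_from_description get_chr_from_description get_chr_from_description_alt
  exact get_chr_go_eq (PySem.Str.split₀ description)
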